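-- pv_equiv track=rewrite | github.com/LjubicaKolak2002/Faks-Vjezbe | Graf_Algoritmi/GA_Vjezba4/kolak_ljubica_04_01.py | remove_duplicate_edges
-- ===== SOURCE A (Python) =====
-- def sort_edges_by_capital(graph):
--     sorted_graph = {}
--     for vertex, edges in graph.items():
--         sorted_edges = sorted(edges, key=lambda x: (x[0], x[1]))
--         sorted_graph[vertex] = sorted_edges
--     return sorted_graph
--
-- def remove_duplicate_edges(graph):
--     new_graph = {}
--     for vertex, edges in graph.items():
--         new_edges = set()
--         for neighbor, id in edges:
--             if (neighbor, id) not in new_edges and (vertex, id) not in new_graph.get(neighbor, []):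
--                 new_edges.add((neighbor, id))
--         new_graph[vertex] = list(new_edges)
--
--     return sort_edges_by_capital(new_graph)
-- ===== SOURCE B (Python) =====
-- def remove_duplicate_edges(graph):
--     # Closed-form filter: an edge u->(v,id) is dropped iff v appears earlier than u
--     # in the dict and (u,id) is among v's edges; otherwise it is kept (deduplicated),
--     # then each vertex's kept edges are sorted.
--     pos = {v: i for i, v in enumerate(graph)}
--     edge_sets = {v: set(edges) for v, edges in graph.items()}
--     n = len(graph)
--     result = {}
--     for u, edges in graph.items():
--         kept = {(v, i) for v, i in edges
--                 if pos.get(v, n) >= pos[u] or (u, i) not in edge_sets[v]}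
--         result[u] = sorted(kept)
--     return result
-- ===== Notes on version B (the rewrite author's own statement) =====
-- stated objective: alternative
-- what changed: Replaces A's incremental build-and-inspect-partial-output dict loop by precomputed per-vertex edge sets plus a position index, so each vertex's kept edges are obtained by one closed-form filtering pass instead of consulting the partially built result.
import Mathlib
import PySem

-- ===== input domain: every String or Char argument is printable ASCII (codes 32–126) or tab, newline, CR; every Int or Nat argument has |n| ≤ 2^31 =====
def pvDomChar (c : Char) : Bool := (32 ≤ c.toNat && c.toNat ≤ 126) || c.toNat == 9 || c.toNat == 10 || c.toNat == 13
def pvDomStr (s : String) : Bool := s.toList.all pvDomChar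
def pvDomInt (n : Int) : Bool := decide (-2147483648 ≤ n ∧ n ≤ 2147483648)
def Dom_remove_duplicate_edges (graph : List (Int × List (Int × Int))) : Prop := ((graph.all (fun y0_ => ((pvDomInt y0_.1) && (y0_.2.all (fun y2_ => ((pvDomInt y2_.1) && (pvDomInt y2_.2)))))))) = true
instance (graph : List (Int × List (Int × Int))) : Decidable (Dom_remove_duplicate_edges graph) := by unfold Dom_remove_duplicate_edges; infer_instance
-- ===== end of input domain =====

-- B replaces A's build-and-inspect-partial-output loop by precomputed per-vertex edge sets
-- plus a position index, filtering each vertex's edges in one closed-form pass (alternative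
-- decomposition; equal return value — both functions only return, neither mutates its argument).

-- ===== PORT A =====
-- Python dict argument/results are modelled as PySem.Dict built from the assoc list;
-- `list(new_edges)` is the identity on PySem.Set's underlying list (only membership and a
-- final keyed sort consume it, so Python's set iteration order cannot be observed).
def sort_edges_by_capital (graph : PySem.Dict Int (List (Int × Int))) : PySem.Dict Int (List (Int × Int)) :=
  graph.items.foldl (fun sorted_graph p =>
    sorted_graph.insert p.1 (PySem.List.sorted2 p.2 (fun x => x.1) (fun x => x.2))) PySem.Dict.empty

def remove_duplicate_edges (graph : List (Int × List (Int × Int))) : List (Int × List (Int × Int)) :=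
  let g : PySem.Dict Int (List (Int × Int)) := PySem.Dict.ofList graph
  let new_graph : PySem.Dict Int (List (Int × Int)) :=
    g.items.foldl (fun new_graph p =>
      let new_edges : PySem.Set (Int × Int) :=
        p.2.foldl (fun new_edges e =>
          if !(PySem.Set.contains new_edges e) && !((new_graph.getD e.1 []).contains (p.1, e.2)) then
            PySem.Set.add new_edges e
          else new_edges) PySem.Set.empty
      new_graph.insert p.1 new_edges) PySem.Dict.empty
  (sort_edges_by_capital new_graph).items

-- ===== PORT B =====
-- `pos[u]` in Source B is a lookup of a key certainly present; ported as getD with default 0.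
-- `sorted(kept)` sorts Int pairs by Python's lexicographic tuple order = sorted2 on the two fields.
def remove_duplicate_edges_alt (graph : List (Int × List (Int × Int))) : List (Int × List (Int × Int)) :=
  let g : PySem.Dict Int (List (Int × Int)) := PySem.Dict.ofList graph
  let pos : PySem.Dict Int Int :=
    (PySem.List.enumerate g.keys).foldl (fun d q => d.insert q.2 q.1) PySem.Dict.empty
  let edge_sets : PySem.Dict Int (PySem.Set (Int × Int)) :=
    g.items.foldl (fun d q => d.insert q.1 (PySem.Set.ofList q.2)) PySem.Dict.empty
  let n : Int := (g.size : Int)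
  (g.items.foldl (fun result p =>
    result.insert p.1 (PySem.List.sorted2
      (PySem.Set.ofList (p.2.filter (fun e =>
        decide (pos.getD p.1 0 ≤ pos.getD e.1 n) ||
          !((edge_sets.getD e.1 PySem.Set.empty).contains (p.1, e.2)))))
      (fun x => x.1) (fun x => x.2))) PySem.Dict.empty).items

-- ===== PRECONDITION & SPEC =====
def Spec_remove_duplicate_edges (graph : List (Int × List (Int × Int))) (out : List (Int × List (Int × Int))) : Prop := out = remove_duplicate_edges_alt graph
instance (graph : List (Int × List (Int × Int))) (out : List (Int × List (Int × Int))) : Decidable (Spec_remove_duplicate_edges graph out) := by unfold Spec_remove_duplicate_edges; infer_instance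

-- ===== CLAIM (what is proved, stated in full; the proofs are below) =====
def Claim_equal_remove_duplicate_edges : Prop := ∀ (graph : List (Int × List (Int × Int))), Dom_remove_duplicate_edges graph → Spec_remove_duplicate_edges graph (remove_duplicate_edges graph)

-- ===== LEMMAS AND PROOFS =====

--『lookD acc k』 is Dict.getD (Dict.mk acc) k [] written on the raw item list.
def lookD (acc : List (Int × List (Int × Int))) (k : Int) : List (Int × Int) :=
  (Option.map Prod.snd (List.find? (fun p => p.1 == k) acc)).getD []

-- A's inner loop over one vertex's edges, with the partial result's items `acc` fixed.
def keptA (acc : List (Int × List (Int × Int))) (u : Int) (es : List (Int × Int)) : PySem.Set (Int × Int) :=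
  es.foldl (fun ne e =>
    if !(PySem.Set.contains ne e) && !((lookD acc e.1).contains (u, e.2)) then
      PySem.Set.add ne e
    else ne) PySem.Set.empty

-- items of A's new_graph, as a structural recursion.
def ang (acc : List (Int × List (Int × Int))) : List (Int × List (Int × Int)) → List (Int × List (Int × Int))
  | [] => acc
  | p :: t => ang (acc ++ [(p.1, keptA acc p.1 p.2)]) t

theorem kept_step_mem (pass : (Int × Int) → Bool) (ne : PySem.Set (Int × Int)) (a e : Int × Int) :
    e ∈ (if !(PySem.Set.contains ne a) && pass a then PySem.Set.add ne a else ne) ↔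
      e ∈ ne ∨ (e = a ∧ pass a = true) := by
  by_cases hc : PySem.Set.contains ne a = true <;> by_cases hp : pass a = true
  · rw [if_neg (by rw [hc]; simp)]
    have ha : a ∈ ne := (PySem.Set.contains_iff ne a).1 hc
    constructor
    · exact Or.inl
    · rintro (h | ⟨rfl, _⟩) <;> [exact h; exact ha]
  · have hpf : pass a = false := by revert hp; cases pass a <;> simp
    rw [if_neg (by rw [hpf]; simp)]
    constructor
    · exact Or.inl
    · rintro (h | ⟨rfl, h⟩) <;> [exact h; exact absurd h hp]
  · have hcf : PySem.Set.contains ne a = false := by revert hc; cases PySem.Set.contains ne a <;> simp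
    rw [if_pos (by rw [hcf, hp]; rfl)]
    rw [PySem.Set.mem_add]
    constructor
    · rintro (h | rfl) <;> [exact Or.inl h; exact Or.inr ⟨rfl, hp⟩]
    · rintro (h | ⟨rfl, _⟩) <;> [exact Or.inl h; exact Or.inr rfl]
  · have hpf : pass a = false := by revert hp; cases pass a <;> simp
    rw [if_neg (by rw [hpf]; simp)]
    constructor
    · exact Or.inl
    · rintro (h | ⟨rfl, h⟩) <;> [exact h; exact absurd h hp]

theorem mem_foldl_kept (pass : (Int × Int) → Bool) :
    ∀ (es : List (Int × Int)) (ne : PySem.Set (Int × Int)) (e : Int × Int),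
      e ∈ es.foldl (fun ne e => if !(PySem.Set.contains ne e) && pass e then PySem.Set.add ne e else ne) ne ↔
        e ∈ ne ∨ (e ∈ es ∧ pass e = true) := by
  intro es
  induction es with
  | nil => intro ne e; simp [List.foldl]
  | cons a t ih =>
    intro ne e
    rw [List.foldl_cons, ih, kept_step_mem]
    simp only [List.mem_cons]
    constructor
    · rintro ((h | ⟨rfl, hp⟩) | ⟨h, hp⟩)
      · exact Or.inl h
      · exact Or.inr ⟨Or.inl rfl, hp⟩
      · exact Or.inr ⟨Or.inr h, hp⟩
    · rintro (h | ⟨(rfl | h), hp⟩)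
      · exact Or.inl (Or.inl h)
      · exact Or.inl (Or.inr ⟨rfl, hp⟩)
      · exact Or.inr ⟨h, hp⟩

theorem nodup_foldl_kept (pass : (Int × Int) → Bool) :
    ∀ (es : List (Int × Int)) (ne : PySem.Set (Int × Int)), ne.Nodup →
      (es.foldl (fun ne e => if !(PySem.Set.contains ne e) && pass e then PySem.Set.add ne e else ne) ne).Nodup := by
  intro es
  induction es with
  | nil => intro ne h; simpa [List.foldl]
  | cons a t ih =>
    intro ne h
    simp only [List.foldl_cons]
    apply ih
    split
    · exact PySem.Set.nodup_add ne a h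
    · exact h

theorem mem_keptA (acc : List (Int × List (Int × Int))) (u : Int) (es : List (Int × Int)) (e : Int × Int) :
    e ∈ keptA acc u es ↔ e ∈ es ∧ (u, e.2) ∉ lookD acc e.1 := by
  unfold keptA
  rw [mem_foldl_kept (fun e => !((lookD acc e.1).contains (u, e.2))) es PySem.Set.empty e]
  simp [PySem.Set.empty]

theorem nodup_keptA (acc : List (Int × List (Int × Int))) (u : Int) (es : List (Int × Int)) :
    (keptA acc u es).Nodup := by
  unfold keptA
  exact nodup_foldl_kept _ es PySem.Set.empty (by simp [PySem.Set.empty])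

theorem ang_append (P Q acc : List (Int × List (Int × Int))) :
    ang acc (P ++ Q) = ang (ang acc P) Q := by
  induction P generalizing acc with
  | nil => simp [ang]
  | cons p t ih => simp only [List.cons_append, ang]; exact ih _

theorem keys_ang (t acc : List (Int × List (Int × Int))) :
    (ang acc t).map Prod.fst = acc.map Prod.fst ++ t.map Prod.fst := by
  induction t generalizing acc with
  | nil => simp [ang]
  | cons p t ih => simp [ang, ih]

theorem lookD_eq_nil (M : List (Int × List (Int × Int))) (v : Int) (h : v ∉ M.map Prod.fst) :
    lookD M v = [] := by
  unfold lookD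
  rw [List.find?_eq_none.2]
  · rfl
  · intro x hx
    simp only [beq_iff_eq]
    intro hv
    exact h (by simpa [hv] using List.mem_map_of_mem (f := Prod.fst) hx)

-- the crux on A's side: membership in the partial result at a later vertex u
theorem mem_lookD_ang (u : Int) :
    ∀ (pre : List (Int × List (Int × Int))), (pre.map Prod.fst).Nodup → u ∉ pre.map Prod.fst →
      ∀ (v i : Int), ((u, i) ∈ lookD (ang [] pre) v ↔ ∃ q ∈ pre, q.1 = v ∧ (u, i) ∈ q.2) := by
  intro pre
  induction pre using List.reverseRecOn with
  | nil =>
    intro _ _ v i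
    simp [ang, lookD]
  | append_singleton pre q ih =>
    intro hnd hu v i
    rw [show ang [] (pre ++ [q]) = ang [] pre ++ [(q.1, keptA (ang [] pre) q.1 q.2)] by
      rw [ang_append]; rfl]
    have hndp : (pre.map Prod.fst).Nodup := by
      simpa using (List.nodup_append.1 (by simpa using hnd)).1
    have hq1 : q.1 ∉ pre.map Prod.fst := by
      have hnd2 : (pre.map Prod.fst ++ [q.1]).Nodup := by simpa using hnd
      intro hmem
      exact (List.disjoint_of_nodup_append hnd2) hmem (by simp)
    have hupre : u ∉ pre.map Prod.fst := fun hm => hu (by simp [hm])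
    unfold lookD
    rw [List.find?_append]
    by_cases hv : v ∈ pre.map Prod.fst
    · have : (List.find? (fun p => p.1 == v) (ang [] pre)).isSome = true := by
        rw [List.find?_isSome]
        rcases List.mem_map.1 hv with ⟨r, hr, hre⟩
        rcases List.mem_map.1 (show v ∈ (ang [] pre).map Prod.fst by
          rw [keys_ang]; simpa [hre] using List.mem_map_of_mem (f := Prod.fst) hr) with ⟨w, hw, hwe⟩
        exact ⟨w, hw, by simp [hwe]⟩
      rcases Option.isSome_iff_exists.1 this with ⟨w, hw⟩
      rw [hw]
      have := (ih hndp hupre v i)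
      unfold lookD at this
      rw [hw] at this
      simp only [Option.some_or] at this ⊢
      rw [this]
      constructor
      · rintro ⟨r, hr, h1, h2⟩; exact ⟨r, by simp [hr], h1, h2⟩
      · rintro ⟨r, hr, h1, h2⟩
        rcases List.mem_append.1 hr with hr | hr
        · exact ⟨r, hr, h1, h2⟩
        · exfalso
          simp only [List.mem_singleton] at hr
          subst hr
          exact hq1 (h1 ▸ hv)
    · have hnone : List.find? (fun p => p.1 == v) (ang [] pre) = none := by
        rw [List.find?_eq_none]
        intro x hx
        simp only [beq_iff_eq]
        intro hxv
        have hx1 : x.1 ∈ (ang [] pre).map Prod.fst := List.mem_map_of_mem (f := Prod.fst) hx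
        rw [keys_ang] at hx1
        simp only [List.map_nil, List.nil_append] at hx1
        exact hv (hxv ▸ hx1)
      rw [hnone]
      simp only [Option.none_or]
      by_cases hqv : q.1 = v
      · simp only [List.find?_cons, hqv]
        simp only [beq_self_eq_true]
        simp only [Option.map_some, Option.getD_some]
        rw [mem_keptA]
        have hlu : lookD (ang [] pre) u = [] := by
          apply lookD_eq_nil; rw [keys_ang]; simpa using hupre
        constructor
        · rintro ⟨hmem, -⟩
          exact ⟨q, List.mem_append_right _ (by simp), hqv, hmem⟩
        · rintro ⟨r, hr, h1, h2⟩
          refine ⟨?_, by simp [hlu]⟩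
          rcases List.mem_append.1 hr with hr | hr
          · exact absurd (show v ∈ pre.map Prod.fst by
              simpa [h1] using List.mem_map_of_mem (f := Prod.fst) hr) hv
          · simp only [List.mem_singleton] at hr; subst hr; exact h2
      · have : (q.1 == v) = false := by simp [hqv]
        simp only [List.find?_cons, this]
        simp only [lookD, Option.none_or, List.find?_nil, Option.map_none, Option.getD_none]
        simp only [List.not_mem_nil, false_iff, not_exists, not_and]
        rintro r hr h1
        exfalso
        rcases List.mem_append.1 hr with hr | hr
        · exact hv (by simpa [h1] using List.mem_map_of_mem (f := Prod.fst) hr)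
        · simp only [List.mem_singleton] at hr; subst hr; exact hqv h1

-- generic fresh-key fold: inserting pairwise-distinct new keys appends items in order
theorem items_foldl_insert {γ ν : Type} (key : γ → Int) (f : γ → ν) :
    ∀ (t : List γ) (acc : List (Int × ν)),
      (acc.map Prod.fst ++ t.map key).Nodup →
      (t.foldl (fun d x => d.insert (key x) (f x)) (PySem.Dict.mk acc)).items
        = acc ++ t.map (fun x => (key x, f x)) := by
  intro t
  induction t with
  | nil => intro acc h; simp [List.foldl]
  | cons x t ih =>
    intro acc h
    rw [List.foldl_cons]
    have hkx : key x ∉ acc.map Prod.fst := by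
      intro hm
      exact (List.disjoint_of_nodup_append (by simpa using h)) hm (by simp)
    have hcf : (PySem.Dict.mk acc).contains (key x) = false := by
      simp only [PySem.Dict.contains, List.any_eq_false]
      intro p hp
      simp only [beq_iff_eq]
      intro hpk
      exact hkx (by simpa [hpk] using List.mem_map_of_mem (f := Prod.fst) hp)
    have hins : (PySem.Dict.mk acc).insert (key x) (f x) = PySem.Dict.mk (acc ++ [(key x, f x)]) := by
      simp [PySem.Dict.insert, hcf]
    rw [hins, ih (acc ++ [(key x, f x)]) (by simpa using h)]
    simp

-- A's outer fold equals `ang`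
theorem foldlA_eq_ang :
    ∀ (t acc : List (Int × List (Int × Int))),
      (acc.map Prod.fst ++ t.map Prod.fst).Nodup →
      t.foldl (fun new_graph p =>
        new_graph.insert p.1
          (p.2.foldl (fun new_edges e =>
            if !(PySem.Set.contains new_edges e) && !((new_graph.getD e.1 []).contains (p.1, e.2)) then
              PySem.Set.add new_edges e
            else new_edges) PySem.Set.empty)) (PySem.Dict.mk acc)
        = PySem.Dict.mk (ang acc t) := by
  intro t
  induction t with
  | nil => intro acc h; simp [List.foldl, ang]
  | cons p t ih =>
    intro acc h
    rw [List.foldl_cons]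
    have hkx : p.1 ∉ acc.map Prod.fst := by
      intro hm
      exact (List.disjoint_of_nodup_append (by simpa using h)) hm (by simp)
    have hcf : (PySem.Dict.mk acc).contains p.1 = false := by
      simp only [PySem.Dict.contains, List.any_eq_false]
      intro r hr
      simp only [beq_iff_eq]
      intro hpk
      exact hkx (by simpa [hpk] using List.mem_map_of_mem (f := Prod.fst) hr)
    have hgd : ∀ k, (PySem.Dict.mk acc).getD k [] = lookD acc k := fun _ => rfl
    have hins : (PySem.Dict.mk acc).insert p.1
        (p.2.foldl (fun new_edges e =>
          if !(PySem.Set.contains new_edges e) && !(((PySem.Dict.mk acc).getD e.1 []).contains (p.1, e.2)) then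
            PySem.Set.add new_edges e
          else new_edges) PySem.Set.empty)
        = PySem.Dict.mk (acc ++ [(p.1, keptA acc p.1 p.2)]) := by
      simp only [PySem.Dict.insert, hcf]
      rfl
    rw [hins, ih _ (by simpa using h)]
    rfl

-- sorted2 on Int pairs is sorting by the lexicographic (Python tuple) order
theorem sorted2_eq_sorted_lex (xs : List (Int × Int)) :
    PySem.List.sorted2 xs (fun x => x.1) (fun x => x.2)
      = PySem.List.sorted xs (fun x => toLex x) := by
  unfold PySem.List.sorted2 PySem.List.sorted
  simp only [Bool.false_eq_true, if_false]
  congr 1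
  funext acc x
  congr 1
  funext a b
  by_cases h1 : a.1 < b.1 <;> by_cases h2 : b.1 < a.1 <;> by_cases h3 : a.2 < b.2 <;>
    simp [h1, h2, h3, Prod.Lex.lt_iff] <;> omega

theorem sorted2_congr_perm (xs ys : List (Int × Int)) (h : xs.Perm ys) :
    PySem.List.sorted2 xs (fun x => x.1) (fun x => x.2)
      = PySem.List.sorted2 ys (fun x => x.1) (fun x => x.2) := by
  rw [sorted2_eq_sorted_lex, sorted2_eq_sorted_lex]
  exact PySem.List.sorted_eq_sorted_of_perm xs ys (fun x => toLex x) (fun a b hab => hab) h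

-- enumerate facts
theorem enum_map_snd : ∀ (ks : List Int) (s : Int), (PySem.List.enumerate ks s).map Prod.snd = ks := by
  intro ks
  induction ks with
  | nil => intro s; simp [PySem.List.enumerate]
  | cons k t ih => intro s; simp [PySem.List.enumerate, ih]

theorem find_enum_none (v : Int) : ∀ (ks : List Int), v ∉ ks → ∀ s,
    List.find? (fun q => q.2 == v) (PySem.List.enumerate ks s) = none := by
  intro ks
  induction ks with
  | nil => intro h s; simp [PySem.List.enumerate]
  | cons k t ih =>
    intro h s
    simp only [PySem.List.enumerate, List.find?_cons]
    have : ((s, k).2 == v) = false := by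
      simp only [beq_eq_false_iff_ne]
      intro hk
      exact h (by simp [hk])
    rw [this]
    exact ih (fun hm => h (by simp [hm])) (s + 1)

theorem find_enum_some (v : Int) : ∀ (pre : List Int), v ∉ pre → ∀ (post : List Int) (s : Int),
    List.find? (fun q => q.2 == v) (PySem.List.enumerate (pre ++ v :: post) s)
      = some (s + pre.length, v) := by
  intro pre
  induction pre with
  | nil =>
    intro _ post s
    simp [PySem.List.enumerate]
  | cons k t ih =>
    intro h post s
    simp only [List.cons_append, PySem.List.enumerate, List.find?_cons]
    have : ((s, k).2 == v) = false := by
      simp only [beq_eq_false_iff_ne]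
      intro hk
      exact h (by simp [hk])
    rw [this, ih (fun hm => h (by simp [hm])) post (s + 1)]
    congr 1
    simp only [List.length_cons]
    push_cast
    ring_nf

-- the position dictionary of B, characterised
def posOf (ks : List Int) : PySem.Dict Int Int :=
  (PySem.List.enumerate ks).foldl (fun d q => d.insert q.2 q.1) PySem.Dict.empty

theorem posOf_items (ks : List Int) (hnd : ks.Nodup) :
    (posOf ks).items = (PySem.List.enumerate ks).map (fun q => (q.2, q.1)) := by
  unfold posOf
  have h := items_foldl_insert (γ := Int × Int) Prod.snd Prod.fst (PySem.List.enumerate ks) []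
    (by simpa [enum_map_snd] using hnd)
  simpa using h

theorem posOf_getD (ks : List Int) (hnd : ks.Nodup) (v dflt : Int) :
    (posOf ks).getD v dflt
      = ((List.find? (fun q => q.2 == v) (PySem.List.enumerate ks)).map Prod.fst).getD dflt := by
  simp only [PySem.Dict.getD, PySem.Dict.get?, posOf_items ks hnd, List.find?_map]
  have hco : ((fun (p : Int × Int) => p.1 == v) ∘ fun (q : Int × Int) => (q.2, q.1))
      = fun (q : Int × Int) => q.2 == v := rfl
  rw [hco]
  cases List.find? (fun (q : Int × Int) => q.2 == v) (PySem.List.enumerate ks) <;> simp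

theorem posOf_getD_split (pre post : List Int) (v : Int) (hnd : (pre ++ v :: post).Nodup) (dflt : Int) :
    (posOf (pre ++ v :: post)).getD v dflt = (pre.length : Int) := by
  have hv : v ∉ pre := fun hm => (List.disjoint_of_nodup_append hnd) hm (by simp)
  rw [posOf_getD _ hnd, find_enum_some v pre hv post 0]
  simp

theorem posOf_getD_not_mem (ks : List Int) (hnd : ks.Nodup) (v : Int) (h : v ∉ ks) (dflt : Int) :
    (posOf ks).getD v dflt = dflt := by
  rw [posOf_getD _ hnd, find_enum_none v ks h 0]
  simp

-- B's edge_sets dictionary, characterised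
def esOf (L : List (Int × List (Int × Int))) : PySem.Dict Int (PySem.Set (Int × Int)) :=
  L.foldl (fun d q => d.insert q.1 (PySem.Set.ofList q.2)) PySem.Dict.empty

theorem find_of_mem_nodup (L : List (Int × List (Int × Int))) (q : Int × List (Int × Int))
    (hnd : (L.map Prod.fst).Nodup) (hq : q ∈ L) :
    List.find? (fun r => r.1 == q.1) L = some q := by
  induction L with
  | nil => cases hq
  | cons r t ih =>
    rcases List.mem_cons.1 hq with rfl | hq
    · simp [List.find?_cons]
    · have hnd' : r.1 ∉ t.map Prod.fst ∧ (t.map Prod.fst).Nodup := by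
        rw [List.map_cons] at hnd
        exact List.nodup_cons.1 hnd
      have hr1 : (r.1 == q.1) = false := by
        simp only [beq_eq_false_iff_ne]
        intro he
        exact hnd'.1 (by simpa [← he] using List.mem_map_of_mem (f := Prod.fst) hq)
      rw [List.find?_cons, hr1]
      exact ih hnd'.2 hq

theorem esOf_getD (L : List (Int × List (Int × Int))) (hnd : (L.map Prod.fst).Nodup)
    (q : Int × List (Int × Int)) (hq : q ∈ L) :
    (esOf L).getD q.1 PySem.Set.empty = PySem.Set.ofList q.2 := by
  have hit : (esOf L).items = L.map (fun r => (r.1, PySem.Set.ofList r.2)) := by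
    unfold esOf
    simpa using items_foldl_insert (γ := Int × List (Int × Int)) Prod.fst
      (fun r => PySem.Set.ofList r.2) L [] (by simpa using hnd)
  simp only [PySem.Dict.getD, PySem.Dict.get?, hit, List.find?_map]
  have hco : ((fun (p : Int × PySem.Set (Int × Int)) => p.1 == q.1)
      ∘ fun (r : Int × List (Int × Int)) => (r.1, PySem.Set.ofList r.2))
      = fun (r : Int × List (Int × Int)) => r.1 == q.1 := rfl
  rw [hco, find_of_mem_nodup L q hnd hq]
  simp

-- position comparison: a neighbor sorts before vertex p iff it is a key of the prefix
theorem posOf_lt_iff (L pre t : List (Int × List (Int × Int))) (p : Int × List (Int × Int))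
    (hnd : (L.map Prod.fst).Nodup) (hL : L = pre ++ p :: t) (v : Int) :
    ((posOf (L.map Prod.fst)).getD v (L.length : Int) < (posOf (L.map Prod.fst)).getD p.1 0
      ↔ v ∈ pre.map Prod.fst) := by
  subst hL
  have hks : (pre.map Prod.fst ++ p.1 :: t.map Prod.fst).Nodup := by simpa using hnd
  have hkse : (pre ++ p :: t).map Prod.fst = pre.map Prod.fst ++ p.1 :: t.map Prod.fst := by simp
  have hpu : (posOf ((pre ++ p :: t).map Prod.fst)).getD p.1 0 = (pre.map Prod.fst).length := by
    rw [hkse]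
    exact posOf_getD_split (pre.map Prod.fst) (t.map Prod.fst) p.1 hks 0
  rw [hpu]
  by_cases hv : v ∈ pre.map Prod.fst
  · rcases List.append_of_mem hv with ⟨a, b, hab⟩
    have hva : v ∉ a := by
      have : (a ++ v :: b).Nodup := by
        rw [← hab]
        exact (List.nodup_append.1 hks).1
      exact fun hm => (List.disjoint_of_nodup_append this) hm (by simp)
    have hsplit : (pre ++ p :: t).map Prod.fst = a ++ v :: (b ++ p.1 :: t.map Prod.fst) := by
      rw [hkse, hab]
      simp
    have hnds : (a ++ v :: (b ++ p.1 :: t.map Prod.fst)).Nodup := by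
      rw [← hsplit, hkse]
      exact hks
    rw [hsplit, posOf_getD_split a (b ++ p.1 :: t.map Prod.fst) v hnds (((pre ++ p :: t).length : Int))]
    have : a.length < (pre.map Prod.fst).length := by
      rw [hab]
      simp
    simpa [hv] using (by exact_mod_cast this : (a.length : Int) < ((pre.map Prod.fst).length : Int))
  · by_cases hvp : v = p.1
    · subst hvp
      rw [hkse, posOf_getD_split (pre.map Prod.fst) (t.map Prod.fst) _ hks]
      simp [hv]
    · by_cases hvt : v ∈ t.map Prod.fst
      · rcases List.append_of_mem hvt with ⟨c, d, hcd⟩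
        have hsplit : (pre ++ p :: t).map Prod.fst
            = (pre.map Prod.fst ++ p.1 :: c) ++ v :: d := by
          rw [hkse, hcd]
          simp
        have hnds : ((pre.map Prod.fst ++ p.1 :: c) ++ v :: d).Nodup := by
          rw [← hsplit, hkse]
          exact hks
        rw [hsplit, posOf_getD_split _ d v hnds]
        have : (pre.map Prod.fst).length ≤ (pre.map Prod.fst ++ p.1 :: c).length := by
          simp
        simp only [hv, iff_false, not_lt]
        exact_mod_cast this
      · have hvks : v ∉ (pre ++ p :: t).map Prod.fst := by
          rw [hkse]
          simp only [List.mem_append, List.mem_cons]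
          rintro (h | h | h) <;> [exact hv h; exact hvp h; exact hvt h]
        rw [posOf_getD_not_mem _ (by simpa [hkse] using hks) v hvks]
        have : (pre.map Prod.fst).length ≤ (pre ++ p :: t).length := by
          simp
        simp only [hv, iff_false, not_lt]
        exact_mod_cast this

-- B's filter condition on the full graph items L
def condB (L : List (Int × List (Int × Int))) (u : Int) (e : Int × Int) : Bool :=
  decide ((posOf (L.map Prod.fst)).getD u 0 ≤ (posOf (L.map Prod.fst)).getD e.1 (L.length : Int)) ||
    !(((esOf L).getD e.1 PySem.Set.empty).contains (u, e.2))

-- the crux: at vertex p with prefix pre, A's kept set and B's filter keep the same edges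
theorem condB_false_iff (L pre t : List (Int × List (Int × Int))) (p : Int × List (Int × Int))
    (hnd : (L.map Prod.fst).Nodup) (hL : L = pre ++ p :: t) (e : Int × Int) :
    condB L p.1 e = false ↔ ∃ q ∈ pre, q.1 = e.1 ∧ (p.1, e.2) ∈ q.2 := by
  have hpL : p ∈ L := by rw [hL]; exact List.mem_append_right _ (by simp)
  unfold condB
  rw [Bool.or_eq_false_iff]
  constructor
  · rintro ⟨h1, h2⟩
    have hlt : (posOf (L.map Prod.fst)).getD e.1 (L.length : Int)
        < (posOf (L.map Prod.fst)).getD p.1 0 := by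
      have := of_decide_eq_false h1
      omega
    have hv : e.1 ∈ pre.map Prod.fst := (posOf_lt_iff L pre t p hnd hL e.1).1 hlt
    rcases List.mem_map.1 hv with ⟨q, hq, hq1⟩
    have hcon : ((esOf L).getD e.1 PySem.Set.empty).contains (p.1, e.2) = true := by
      revert h2
      cases ((esOf L).getD e.1 PySem.Set.empty).contains (p.1, e.2) <;> simp
    rw [← hq1, esOf_getD L hnd q (by rw [hL]; exact List.mem_append_left _ hq)] at hcon
    exact ⟨q, hq, hq1, (PySem.Set.mem_ofList _ _).1 ((PySem.Set.contains_iff _ _).1 hcon)⟩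
  · rintro ⟨q, hq, hq1, hqm⟩
    have hv : e.1 ∈ pre.map Prod.fst := by
      rw [← hq1]
      exact List.mem_map_of_mem (f := Prod.fst) hq
    have hlt := (posOf_lt_iff L pre t p hnd hL e.1).2 hv
    constructor
    · simpa using (by omega : ¬ (posOf (L.map Prod.fst)).getD p.1 0 ≤ (posOf (L.map Prod.fst)).getD e.1 (L.length : Int))
    · have hcon : ((esOf L).getD e.1 PySem.Set.empty).contains (p.1, e.2) = true := by
        rw [← hq1, esOf_getD L hnd q (by rw [hL]; exact List.mem_append_left _ hq)]
        exact (PySem.Set.contains_iff _ _).2 ((PySem.Set.mem_ofList _ _).2 hqm)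
      rw [hcon]
      rfl

theorem vertex_eq (L pre t : List (Int × List (Int × Int))) (p : Int × List (Int × Int))
    (hnd : (L.map Prod.fst).Nodup) (hL : L = pre ++ p :: t) :
    PySem.List.sorted2 (keptA (ang [] pre) p.1 p.2) (fun x => x.1) (fun x => x.2)
      = PySem.List.sorted2 (PySem.Set.ofList (p.2.filter (condB L p.1))) (fun x => x.1) (fun x => x.2) := by
  apply sorted2_congr_perm
  have hndpre : (pre.map Prod.fst).Nodup := by
    rw [hL] at hnd
    simpa using (List.nodup_append.1 (by simpa using hnd)).1
  have hp1 : p.1 ∉ pre.map Prod.fst := by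
    rw [hL] at hnd
    have hnd2 : (pre.map Prod.fst ++ (p.1 :: t.map Prod.fst)).Nodup := by simpa using hnd
    intro hm
    exact (List.disjoint_of_nodup_append hnd2) hm (by simp)
  rw [List.perm_ext_iff_of_nodup (nodup_keptA _ _ _) (PySem.Set.nodup_ofList _)]
  intro e
  rw [mem_keptA, PySem.Set.mem_ofList, List.mem_filter]
  rw [mem_lookD_ang p.1 pre hndpre hp1 e.1 e.2]
  constructor
  · rintro ⟨hm, hnot⟩
    refine ⟨hm, ?_⟩
    by_cases hc : condB L p.1 e = true
    · exact hc
    · exact absurd ((condB_false_iff L pre t p hnd hL e).1 (by revert hc; cases condB L p.1 e <;> simp)) hnot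
  · rintro ⟨hm, hc⟩
    refine ⟨hm, fun hex => ?_⟩
    rw [(condB_false_iff L pre t p hnd hL e).2 hex] at hc
    cases hc

-- the grand induction over the vertex list
theorem grand (L : List (Int × List (Int × Int))) (hnd : (L.map Prod.fst).Nodup) :
    ∀ (t pre : List (Int × List (Int × Int))), L = pre ++ t →
      (ang (ang [] pre) t).map (fun p => (p.1, PySem.List.sorted2 p.2 (fun x => x.1) (fun x => x.2)))
        = (ang [] pre).map (fun p => (p.1, PySem.List.sorted2 p.2 (fun x => x.1) (fun x => x.2)))
          ++ t.map (fun p => (p.1, PySem.List.sorted2 (PySem.Set.ofList (p.2.filter (condB L p.1))) (fun x => x.1) (fun x => x.2))) := by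
  intro t
  induction t with
  | nil =>
    intro pre hL
    simp [ang]
  | cons p t ih =>
    intro pre hL
    have hstep : ang (ang [] pre) (p :: t)
        = ang (ang [] (pre ++ [p])) t := by
      rw [ang_append pre [p] []]
      rfl
    rw [hstep, ih (pre ++ [p]) (by rw [hL]; simp)]
    have hsn : ang [] (pre ++ [p]) = ang [] pre ++ [(p.1, keptA (ang [] pre) p.1 p.2)] := by
      rw [ang_append pre [p] []]
      rfl
    rw [hsn]
    rw [List.map_append, List.map_cons]
    simp only [List.map_nil, List.map_cons, List.append_assoc, List.cons_append, List.nil_append]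
    congr 2
    rw [vertex_eq L pre t p hnd hL]

-- ===== VERDICT (by name: the statement is the Claim_ definition above) =====
theorem remove_duplicate_edges_spec : Claim_equal_remove_duplicate_edges := by
  intro graph _
  unfold Spec_remove_duplicate_edges
  have hnd : (((PySem.Dict.ofList graph).items).map Prod.fst).Nodup := by
    simpa [PySem.Dict.keys] using PySem.Dict.nodup_keys_ofList graph
  have hA : remove_duplicate_edges graph
      = (sort_edges_by_capital (PySem.Dict.mk (ang [] ((PySem.Dict.ofList graph).items)))).items := by
    show (sort_edges_by_capital
        (((PySem.Dict.ofList graph).items).foldl (fun new_graph p =>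
          new_graph.insert p.1
            (p.2.foldl (fun new_edges e =>
              if !(PySem.Set.contains new_edges e) && !((new_graph.getD e.1 []).contains (p.1, e.2)) then
                PySem.Set.add new_edges e
              else new_edges) PySem.Set.empty)) (PySem.Dict.mk []))).items = _
    rw [foldlA_eq_ang ((PySem.Dict.ofList graph).items) [] (by simpa using hnd)]
  have hA2 : (sort_edges_by_capital (PySem.Dict.mk (ang [] ((PySem.Dict.ofList graph).items)))).items
      = (ang [] ((PySem.Dict.ofList graph).items)).map
          (fun p => (p.1, PySem.List.sorted2 p.2 (fun x => x.1) (fun x => x.2))) := by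
    have h := items_foldl_insert (γ := Int × List (Int × Int)) Prod.fst
      (fun p => PySem.List.sorted2 p.2 (fun x => x.1) (fun x => x.2))
      (ang [] ((PySem.Dict.ofList graph).items)) []
      (by simpa [keys_ang] using hnd)
    exact h
  have hB : remove_duplicate_edges_alt graph
      = ((PySem.Dict.ofList graph).items).map
          (fun p => (p.1, PySem.List.sorted2
            (PySem.Set.ofList (p.2.filter (condB ((PySem.Dict.ofList graph).items) p.1)))
            (fun x => x.1) (fun x => x.2))) := by
    have h := items_foldl_insert (γ := Int × List (Int × Int)) Prod.fst
      (fun p => PySem.List.sorted2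
        (PySem.Set.ofList (p.2.filter (condB ((PySem.Dict.ofList graph).items) p.1)))
        (fun x => x.1) (fun x => x.2))
      ((PySem.Dict.ofList graph).items) [] (by simpa using hnd)
    exact h
  rw [hA, hA2, hB]
  have hg := grand ((PySem.Dict.ofList graph).items) hnd ((PySem.Dict.ofList graph).items) [] rfl
  simpa [ang] using hg
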